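-- pv_equiv track=rewrite | github.com/daewonlee81-glitch/Roborave-Korea | app.py | _duplicate_name_count
-- ===== SOURCE A (Python) =====
-- def _duplicate_name_count(rows: list[dict[str, str]]) -> int:
--     counts: dict[str, int] = {}
--     duplicates = 0
--     for row in rows:
--         name = row.get("name", "")
--         counts[name] = counts.get(name, 0) + 1
--         if counts[name] > 1:
--             duplicates += 1
--     return duplicates
-- ===== SOURCE B (Python) =====
-- def _duplicate_name_count(rows: list[dict[str, str]]) -> int:
--     distinct_names = {row.get("name", "") for row in rows}
--     return len(rows) - len(distinct_names)
-- ===== Notes on version B (the rewrite author's own statement) =====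
-- stated objective: simpler
-- what changed: Replaces the running count dict and per-row duplicate-increment branch with one pass building the set of distinct names and a closed-form subtraction len(rows) - len(distinct_names).
import Mathlib
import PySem

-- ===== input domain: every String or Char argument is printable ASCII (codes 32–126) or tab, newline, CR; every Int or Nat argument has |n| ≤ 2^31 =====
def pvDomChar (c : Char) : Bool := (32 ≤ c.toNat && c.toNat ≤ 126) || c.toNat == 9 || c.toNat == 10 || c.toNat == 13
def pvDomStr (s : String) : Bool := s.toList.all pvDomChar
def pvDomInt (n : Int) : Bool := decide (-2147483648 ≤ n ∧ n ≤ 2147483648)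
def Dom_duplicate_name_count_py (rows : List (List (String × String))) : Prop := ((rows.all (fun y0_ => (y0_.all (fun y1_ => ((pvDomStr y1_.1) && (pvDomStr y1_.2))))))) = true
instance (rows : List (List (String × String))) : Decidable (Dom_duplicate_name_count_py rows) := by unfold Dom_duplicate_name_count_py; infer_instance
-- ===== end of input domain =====

-- B replaces A's running count dict and per-row duplicate branch by a distinct-name set and
-- the closed form len(rows) - len(distinct names); equivalence of the return values is proved below.

-- ===== PORT A =====
-- row.get("name", "")
def pvRowName (row : List (String × String)) : String :=
  (PySem.Dict.mk row).getD "name" ""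

-- one iteration of A's loop body over the state (counts, duplicates)
def pvAStep (st : PySem.Dict String Int × Int) (row : List (String × String)) :
    PySem.Dict String Int × Int :=
  let name := pvRowName row
  let counts := st.1.insert name (st.1.getD name 0 + 1)
  (counts, if counts.getD name 0 > 1 then st.2 + 1 else st.2)

def duplicate_name_count_py (rows : List (List (String × String))) : Int :=
  (rows.foldl pvAStep (PySem.Dict.empty, 0)).2

-- ===== PORT B =====
def duplicate_name_count_py_alt (rows : List (List (String × String))) : Int :=
  let distinct_names := PySem.Set.ofList (rows.map pvRowName)
  (rows.length : Int) - (PySem.Set.len distinct_names : Int)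

-- ===== PRECONDITION & SPEC =====
def Spec_duplicate_name_count_py (rows : List (List (String × String))) (out : Int) : Prop := out = duplicate_name_count_py_alt rows
instance (rows : List (List (String × String))) (out : Int) : Decidable (Spec_duplicate_name_count_py rows out) := by unfold Spec_duplicate_name_count_py; infer_instance

-- ===== CLAIM (what is proved, stated in full; the proofs are below) =====
def Claim_equal_duplicate_name_count_py : Prop := ∀ (rows : List (List (String × String))), Dom_duplicate_name_count_py rows → Spec_duplicate_name_count_py rows (duplicate_name_count_py rows)

-- ===== LEMMAS AND PROOFS =====

-- Loop invariant: counts stores a positive tally exactly for the names already seen (the set s);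
-- A's duplicate counter then advances by (rows processed) minus (new names added to s).
lemma pvLoop_eq (rows : List (List (String × String)))
    (counts : PySem.Dict String Int) (dups : Int) (s : PySem.Set String)
    (hinv : ∀ n : String, 0 ≤ counts.getD n 0 ∧ (0 < counts.getD n 0 ↔ n ∈ s)) :
    (rows.foldl pvAStep (counts, dups)).2 =
      dups + (rows.length : Int)
        - ((PySem.Set.update s (rows.map pvRowName)).length - (s.length : Int)) := by
  induction rows generalizing counts dups s with
  | nil => simp [PySem.Set.update]
  | cons row rest ih =>
    have hname := hinv (pvRowName row)
    by_cases hmem : pvRowName row ∈ s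
    · -- name seen before: counter branch fires, the set does not grow
      have hpos : 0 < counts.getD (pvRowName row) 0 := hname.2.mpr hmem
      have hcontains : PySem.Set.contains s (pvRowName row) = true :=
        (PySem.Set.contains_iff s (pvRowName row)).mpr hmem
      have hadd : PySem.Set.add s (pvRowName row) = s := by
        simp [PySem.Set.add, hmem]
      have hstep : pvAStep (counts, dups) row =
          (counts.insert (pvRowName row) (counts.getD (pvRowName row) 0 + 1), dups + 1) := by
        simp [pvAStep, PySem.Dict.getD_insert_self]
        omega
      have hinv' : ∀ n : String,
          0 ≤ (counts.insert (pvRowName row) (counts.getD (pvRowName row) 0 + 1)).getD n 0 ∧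
          (0 < (counts.insert (pvRowName row) (counts.getD (pvRowName row) 0 + 1)).getD n 0 ↔
            n ∈ PySem.Set.add s (pvRowName row)) := by
        intro n
        rw [PySem.Dict.getD_insert, hadd]
        by_cases hn : n = pvRowName row
        · subst hn
          exact ⟨by simp; omega, ⟨fun _ => hmem, fun _ => by simp; omega⟩⟩
        · simp only [if_neg hn]; exact hinv n
      rw [List.foldl_cons, hstep, ih _ _ _ hinv']
      rw [List.map_cons, PySem.Set.update_cons, hadd]
      push_cast [List.length_cons]
      omega
    · -- new name: counter branch does not fire, the set grows by one element
      have hzero : counts.getD (pvRowName row) 0 = 0 := by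
        have h1 := hname.1
        have h2 : ¬ 0 < counts.getD (pvRowName row) 0 := fun h => hmem (hname.2.mp h)
        omega
      have hcontains : PySem.Set.contains s (pvRowName row) = false := by
        cases hc : PySem.Set.contains s (pvRowName row)
        · rfl
        · exact absurd ((PySem.Set.contains_iff s (pvRowName row)).mp hc) hmem
      have hadd : PySem.Set.add s (pvRowName row) = s ++ [pvRowName row] := by
        simp [PySem.Set.add, hmem]
      have hstep : pvAStep (counts, dups) row =
          (counts.insert (pvRowName row) (counts.getD (pvRowName row) 0 + 1), dups) := by
        simp [pvAStep, PySem.Dict.getD_insert_self, hzero]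
      have hinv' : ∀ n : String,
          0 ≤ (counts.insert (pvRowName row) (counts.getD (pvRowName row) 0 + 1)).getD n 0 ∧
          (0 < (counts.insert (pvRowName row) (counts.getD (pvRowName row) 0 + 1)).getD n 0 ↔
            n ∈ PySem.Set.add s (pvRowName row)) := by
        intro n
        rw [PySem.Dict.getD_insert, hadd]
        by_cases hn : n = pvRowName row
        · subst hn
          exact ⟨by simp; omega, ⟨fun _ => by simp, fun _ => by simp; omega⟩⟩
        · simp only [List.mem_append, List.mem_singleton, hn, or_false]
          exact hinv n
      rw [List.foldl_cons, hstep, ih _ _ _ hinv']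
      rw [List.map_cons, PySem.Set.update_cons, hadd]
      simp only [List.length_cons, List.length_append, List.length_nil]
      push_cast
      omega

-- ===== VERDICT (by name: the statement is the Claim_ definition above) =====
theorem duplicate_name_count_py_spec : Claim_equal_duplicate_name_count_py := by
  intro rows _
  unfold Spec_duplicate_name_count_py duplicate_name_count_py duplicate_name_count_py_alt
  rw [pvLoop_eq rows PySem.Dict.empty 0 ([] : PySem.Set String)
      (by intro n; simp [PySem.Dict.getD_empty])]
  rw [PySem.Set.update_nil_left]
  simp [PySem.Set.len]
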